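-- pv_equiv track=rewrite | github.com/robzor92/hops-util-py | hops/experiment_impl/util/experiment_utils.py | _find_task_and_index
-- ===== SOURCE A (Python) =====
-- def _find_task_and_index(host_port, cluster_spec):
--     """
--
--     Args:
--         host_port:
--         cluster_spec:
--
--     Returns:
--
--     """
--     index = 0
--     for entry in cluster_spec["worker"]:
--         if entry == host_port:
--             return "worker", index
--         index = index + 1
--
--     index = 0
--     for entry in cluster_spec["ps"]:
--         if entry == host_port:
--             return "ps", index
--         index = index + 1
--
--
--     if cluster_spec["chief"][0] == host_port:
--         return "chief", 0
-- ===== SOURCE B (Python) =====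
-- def _find_task_and_index(host_port, cluster_spec):
--     table = {}
--     for task in ("worker", "ps"):
--         for i, entry in enumerate(cluster_spec[task]):
--             if entry not in table:
--                 table[entry] = (task, i)
--     if host_port in table:
--         return table[host_port]
--     if cluster_spec["chief"][0] == host_port:
--         return "chief", 0
-- ===== Notes on version B (the rewrite author's own statement) =====
-- stated objective: alternative
-- what changed: Replaces A's two sequential early-exit scans with a precomputed first-occurrence index table (worker entries before ps entries) and a single dict lookup, keeping the chief check separate.
-- outside the precondition, e.g. on _find_task_and_index('a', {'worker': ['a']}): A returns ('worker', 0), B raises KeyError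
import Mathlib
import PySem

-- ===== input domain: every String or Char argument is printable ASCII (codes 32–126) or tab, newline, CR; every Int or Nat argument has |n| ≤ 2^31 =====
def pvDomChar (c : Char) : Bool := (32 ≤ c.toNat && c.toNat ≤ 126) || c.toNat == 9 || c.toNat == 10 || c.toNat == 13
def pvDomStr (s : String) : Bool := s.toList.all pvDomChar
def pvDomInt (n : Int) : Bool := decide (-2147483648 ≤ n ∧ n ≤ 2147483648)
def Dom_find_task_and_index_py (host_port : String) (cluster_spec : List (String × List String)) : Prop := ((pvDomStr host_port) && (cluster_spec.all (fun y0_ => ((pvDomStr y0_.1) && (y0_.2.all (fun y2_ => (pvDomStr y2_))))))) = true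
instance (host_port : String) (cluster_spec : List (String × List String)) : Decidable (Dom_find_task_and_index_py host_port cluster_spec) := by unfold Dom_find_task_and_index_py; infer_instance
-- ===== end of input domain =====

-- B builds a first-occurrence index table (worker before ps) and does one lookup, instead of A's
-- two sequential early-exit scans; equivalence is over return values (neither mutates its arguments).

-- ===== PORT A =====
-- the 'for entry in …: if entry == host_port: return (task, index); index += 1' loop of A
def pyScanA (host_port task : String) : List String → Int → Option (String × Int)
  | [], _ => none
  | entry :: rest, index =>
      if entry = host_port then some (task, index) else pyScanA host_port task rest (index + 1)

def find_task_and_index_py (host_port : String) (cluster_spec : List (String × List String)) : Option (String × Int) :=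
  match (PySem.Dict.mk cluster_spec).get? "worker" with
  | none => none  -- KeyError, excluded by Pre_
  | some w =>
    match pyScanA host_port "worker" w 0 with
    | some r => some r
    | none =>
      match (PySem.Dict.mk cluster_spec).get? "ps" with
      | none => none  -- KeyError, excluded by Pre_
      | some p =>
        match pyScanA host_port "ps" p 0 with
        | some r => some r
        | none =>
          match (PySem.Dict.mk cluster_spec).get? "chief" with
          | none => none  -- KeyError, excluded by Pre_
          | some c =>
            match PySem.List.pyGet? c 0 with
            | none => none  -- IndexError, excluded by Pre_
            | some ch => if ch = host_port then some ("chief", 0) else none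

-- ===== PORT B =====
-- 'for i, entry in enumerate(cluster_spec[task]): if entry not in table: table[entry] = (task, i)'
def pvAddEntries (task : String) (entries : List String)
    (table : PySem.Dict String (String × Int)) : PySem.Dict String (String × Int) :=
  (PySem.List.enumerate entries).foldl
    (fun t p => if t.contains p.2 then t else t.insert p.2 (task, p.1)) table

def find_task_and_index_py_alt (host_port : String) (cluster_spec : List (String × List String)) : Option (String × Int) :=
  match (PySem.Dict.mk cluster_spec).get? "worker", (PySem.Dict.mk cluster_spec).get? "ps" with
  | some w, some p =>
    let table := pvAddEntries "ps" p (pvAddEntries "worker" w PySem.Dict.empty)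
    match table.get? host_port with
    | some r => some r
    | none =>
      match (PySem.Dict.mk cluster_spec).get? "chief" with
      | none => none  -- KeyError, excluded by Pre_
      | some c =>
        match PySem.List.pyGet? c 0 with
        | none => none  -- IndexError, excluded by Pre_
        | some ch => if ch = host_port then some ("chief", 0) else none
  | _, _ => none  -- KeyError, excluded by Pre_

-- ===== PRECONDITION & SPEC =====
-- Pre_ excludes inputs where A raises (missing 'worker'/'chief' key, empty chief list when the
-- host is not found); it also requires the 'ps' key even when the host occurs among the workers
-- (there A returns but B raises KeyError, since B reads both lists up front to build its table).
def pvPreB (host_port : String) (cluster_spec : List (String × List String)) : Bool :=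
  (((PySem.Dict.mk cluster_spec).get? "worker").elim false fun w =>
    ((PySem.Dict.mk cluster_spec).get? "ps").elim false fun p =>
      decide (host_port ∈ w) || decide (host_port ∈ p) ||
        ((PySem.Dict.mk cluster_spec).get? "chief").elim false fun c => !c.isEmpty)

def Pre_find_task_and_index_py (host_port : String) (cluster_spec : List (String × List String)) : Prop :=
  pvPreB host_port cluster_spec = true
instance (host_port : String) (cluster_spec : List (String × List String)) : Decidable (Pre_find_task_and_index_py host_port cluster_spec) := by unfold Pre_find_task_and_index_py; infer_instance

def pvWitness_find_task_and_index_py : String × (List (String × List String)) :=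
  ("h1", [("worker", ["h2", "h1"]), ("ps", ["h3"]), ("chief", ["h2"])])

def Spec_find_task_and_index_py (host_port : String) (cluster_spec : List (String × List String)) (out : Option (String × Int)) : Prop := out = find_task_and_index_py_alt host_port cluster_spec
instance (host_port : String) (cluster_spec : List (String × List String)) (out : Option (String × Int)) : Decidable (Spec_find_task_and_index_py host_port cluster_spec out) := by unfold Spec_find_task_and_index_py; infer_instance

-- ===== CLAIM (what is proved, stated in full; the proofs are below) =====
def Claim_equal_find_task_and_index_py : Prop := ∀ (host_port : String) (cluster_spec : List (String × List String)), Dom_find_task_and_index_py host_port cluster_spec → Pre_find_task_and_index_py host_port cluster_spec → Spec_find_task_and_index_py host_port cluster_spec (find_task_and_index_py host_port cluster_spec)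

-- ===== LEMMAS AND PROOFS =====

-- Looking up host_port in the table after adding one task's entries = the old binding, or else A's scan.
lemma get_pvAddEntries (host_port task : String) (es : List String) (i : Int)
    (t : PySem.Dict String (String × Int)) :
    ((PySem.List.enumerate es i).foldl
      (fun t p => if t.contains p.2 then t else t.insert p.2 (task, p.1)) t).get? host_port
      = (t.get? host_port).or (pyScanA host_port task es i) := by
  induction es generalizing i t with
  | nil => simp [PySem.List.enumerate, pyScanA]
  | cons e rest ih =>
    rw [PySem.List.enumerate_cons, List.foldl_cons, ih]
    by_cases hc : t.contains e = true
    · have hs : (t.get? e).isSome := by rw [← PySem.Dict.contains_eq_isSome_get?]; exact hc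
      simp only [hc, if_true, pyScanA]
      by_cases he : e = host_port
      · subst he
        cases h : t.get? e with
        | none => simp [h] at hs
        | some v => simp [Option.or]
      · simp [he]
    · have hn : t.get? e = none := by
        cases h : t.get? e with
        | none => rfl
        | some v =>
          have : t.contains e = true := by
            rw [PySem.Dict.contains_eq_isSome_get?, h]; rfl
          exact absurd this hc
      simp only [Bool.not_eq_true] at hc
      simp only [hc, Bool.false_eq_true, if_false, pyScanA]
      rw [PySem.Dict.get?_insert]
      by_cases he : host_port = e
      · subst he
        simp [hn]
      · have h2 : e ≠ host_port := fun h => he h.symm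
        simp [he, h2]

lemma table_get (host_port : String) (w p : List String) :
    (pvAddEntries "ps" p (pvAddEntries "worker" w PySem.Dict.empty)).get? host_port
      = (pyScanA host_port "worker" w 0).or (pyScanA host_port "ps" p 0) := by
  unfold pvAddEntries
  rw [get_pvAddEntries, get_pvAddEntries]
  simp [PySem.Dict.get?_empty]

-- ===== VERDICT (by name: the statement is the Claim_ definition above) =====
theorem find_task_and_index_py_spec : Claim_equal_find_task_and_index_py := by
  intro host_port cluster_spec _ hpre
  unfold Spec_find_task_and_index_py
  unfold Pre_find_task_and_index_py pvPreB at hpre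
  unfold find_task_and_index_py find_task_and_index_py_alt
  cases hw : (PySem.Dict.mk cluster_spec).get? "worker" with
  | none => simp [hw] at hpre
  | some w =>
    cases hp : (PySem.Dict.mk cluster_spec).get? "ps" with
    | none => simp [hw, hp] at hpre
    | some p =>
      dsimp only
      rw [table_get]
      cases hsw : pyScanA host_port "worker" w 0 with
      | some r => simp [Option.or]
      | none =>
        cases hsp : pyScanA host_port "ps" p 0 with
        | some r => simp [Option.or]
        | none => simp [Option.or]
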